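-- pv_equiv track=rewrite | github.com/ULinuxdays/javelin_tracker | javelin_tracker/services.py | _aggregate_risk
-- ===== SOURCE A (Python) =====
-- from typing import Any, Mapping, Sequence
--
-- def _aggregate_risk(flags: list[Any]) -> str:
--     normalised = [str(flag).upper() for flag in flags if str(flag).strip()]
--     if not normalised:
--         return ""
--     if "HIGH" in normalised:
--         return "HIGH"
--     if "MODERATE" in normalised:
--         return "MODERATE"
--     return "LOW"
-- ===== SOURCE B (Python) =====
-- def _aggregate_risk(flags: list) -> str:
--     def _rank(flag) -> int:
--         s = str(flag)
--         if not s.strip():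
--             return 0
--         u = s.upper()
--         if u == "HIGH":
--             return 3
--         if u == "MODERATE":
--             return 2
--         return 1
--     m = max((_rank(flag) for flag in flags), default=0)
--     return {3: "HIGH", 2: "MODERATE", 1: "LOW"}.get(m, "")
-- ===== Notes on version B (the rewrite author's own statement) =====
-- stated objective: alternative
-- what changed: Reduces each flag to a numeric severity rank, takes the maximum rank, and maps it back to a label through a table, instead of building a normalised list and testing membership for each level.
import Mathlib
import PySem

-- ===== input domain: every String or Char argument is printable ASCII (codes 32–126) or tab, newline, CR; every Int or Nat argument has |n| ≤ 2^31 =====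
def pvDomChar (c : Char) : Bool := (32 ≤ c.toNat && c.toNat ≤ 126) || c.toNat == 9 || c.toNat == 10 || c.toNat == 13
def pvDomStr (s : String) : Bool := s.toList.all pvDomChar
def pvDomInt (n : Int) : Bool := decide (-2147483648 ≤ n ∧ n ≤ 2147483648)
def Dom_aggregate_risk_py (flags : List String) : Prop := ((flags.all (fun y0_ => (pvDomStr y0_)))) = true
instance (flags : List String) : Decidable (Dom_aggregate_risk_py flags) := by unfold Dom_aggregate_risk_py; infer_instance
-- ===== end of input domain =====

-- B maps each flag to a numeric severity rank, takes the maximum rank and looks the label up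
-- in a table, instead of building a normalised list and testing membership for each level
-- (objective: alternative algorithm of the same cost).

-- ===== PORT A =====
def aggregate_risk_py (flags : List String) : String :=
  let normalised := (flags.filter (fun f => PySem.Str.strip f ≠ "")).map PySem.Str.upper
  if normalised = [] then ""
  else if normalised.contains "HIGH" then "HIGH"
  else if normalised.contains "MODERATE" then "MODERATE"
  else "LOW"

-- ===== PORT B =====
def pvRank (flag : String) : Int :=
  if PySem.Str.strip flag = "" then 0
  else
    let u := PySem.Str.upper flag
    if u = "HIGH" then 3
    else if u = "MODERATE" then 2
    else 1

def aggregate_risk_py_alt (flags : List String) : String :=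
  let m := PySem.List.maxD (flags.map pvRank) (fun x => x) 0
  (PySem.Dict.ofList [((3 : Int), "HIGH"), (2, "MODERATE"), (1, "LOW")]).getD m ""

-- ===== PRECONDITION & SPEC =====
def Spec_aggregate_risk_py (flags : List String) (out : String) : Prop := out = aggregate_risk_py_alt flags
instance (flags : List String) (out : String) : Decidable (Spec_aggregate_risk_py flags out) := by unfold Spec_aggregate_risk_py; infer_instance

-- ===== CLAIM (what is proved, stated in full; the proofs are below) =====
def Claim_equal_aggregate_risk_py : Prop := ∀ (flags : List String), Dom_aggregate_risk_py flags → Spec_aggregate_risk_py flags (aggregate_risk_py flags)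

-- ===== LEMMAS AND PROOFS =====

-- The maximum rank, written as a plain fold (proof-side restatement of B's max).
def pvM (flags : List String) : Int := (flags.map pvRank).foldl max 0

theorem pvRank_nonneg (f : String) : 0 ≤ pvRank f := by
  unfold pvRank; dsimp only; split_ifs <;> norm_num

theorem pvRank_le_three (f : String) : pvRank f ≤ 3 := by
  unfold pvRank; dsimp only; split_ifs <;> norm_num

theorem foldl_max_acc (l : List Int) (a b : Int) :
    l.foldl max (max a b) = max a (l.foldl max b) := by
  induction l generalizing b with
  | nil => rfl
  | cons x t ih => simp only [List.foldl_cons, max_assoc, ih]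

theorem pvM_cons (f : String) (t : List String) :
    pvM (f :: t) = max (pvRank f) (pvM t) := by
  have h := foldl_max_acc (t.map pvRank) (pvRank f) 0
  simp only [pvM, List.map_cons, List.foldl_cons]
  rw [max_comm 0 (pvRank f), h]

theorem maxD_eq_pvM (flags : List String) :
    PySem.List.maxD (flags.map pvRank) (fun x => x) 0 = pvM flags := by
  cases flags with
  | nil => rfl
  | cons f t =>
    simp only [List.map_cons, PySem.List.maxD, PySem.List.max?_id_cons, Option.getD_some]
    simp only [pvM, List.map_cons, List.foldl_cons]
    calc (t.map pvRank).foldl max (pvRank f)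
        = (t.map pvRank).foldl max (max (pvRank f) 0) := by
          rw [max_eq_left (pvRank_nonneg f)]
      _ = max (pvRank f) ((t.map pvRank).foldl max 0) := foldl_max_acc _ _ _
      _ = (t.map pvRank).foldl max (max 0 (pvRank f)) := by
          rw [← foldl_max_acc, max_comm]

-- A's normalised list, named for the characterisation lemma.
def pvN (flags : List String) : List String :=
  (flags.filter (fun f => PySem.Str.strip f ≠ "")).map PySem.Str.upper

theorem pvM_char (flags : List String) :
    (pvM flags = 3 ↔ "HIGH" ∈ pvN flags) ∧
    (2 ≤ pvM flags ↔ ("HIGH" ∈ pvN flags ∨ "MODERATE" ∈ pvN flags)) ∧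
    (1 ≤ pvM flags ↔ pvN flags ≠ []) ∧
    0 ≤ pvM flags ∧ pvM flags ≤ 3 := by
  induction flags with
  | nil => simp [pvM, pvN]
  | cons f t ih =>
    obtain ⟨ih3, ih2, ih1, ih0, ihle⟩ := ih
    rw [pvM_cons]
    have hNc : pvN (f :: t) =
        if PySem.Str.strip f = "" then pvN t else PySem.Str.upper f :: pvN t := by
      simp only [pvN, List.filter_cons]
      by_cases h : PySem.Str.strip f = ""
      · simp [h]
      · simp [h]
    by_cases hs : PySem.Str.strip f = ""
    · rw [hNc, if_pos hs]
      have hr : pvRank f = 0 := by unfold pvRank; rw [if_pos hs]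
      rw [hr, max_eq_right ih0]
      exact ⟨ih3, ih2, ih1, ih0, ihle⟩
    · rw [hNc, if_neg hs]
      have h0 := pvRank_nonneg f
      have hle := pvRank_le_three f
      have hM0 : 0 ≤ max (pvRank f) (pvM t) := le_max_of_le_right ih0
      have hMle : max (pvRank f) (pvM t) ≤ 3 := max_le hle ihle
      unfold pvRank at *
      rw [if_neg hs] at *
      by_cases hh : PySem.Str.upper f = "HIGH"
      · rw [if_pos hh] at *
        constructor
        · constructor
          · intro _; exact List.mem_cons.2 (Or.inl hh.symm)
          · intro _; omega
        refine ⟨⟨fun _ => Or.inl (List.mem_cons.2 (Or.inl hh.symm)), fun _ => by omega⟩, ?_, hM0, hMle⟩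
        exact ⟨fun _ => by simp, fun _ => by omega⟩
      · rw [if_neg hh] at *
        by_cases hm : PySem.Str.upper f = "MODERATE"
        · rw [if_pos hm] at *
          refine ⟨?_, ?_, ?_, hM0, hMle⟩
          · constructor
            · intro h3
              have : pvM t = 3 := by omega
              exact List.mem_cons.2 (Or.inr (ih3.1 this))
            · intro hmem
              rcases List.mem_cons.1 hmem with h | h
              · exact absurd h.symm hh
              · have := ih3.2 h; omega
          · constructor
            · intro _; exact Or.inr (List.mem_cons.2 (Or.inl hm.symm))
            · intro _; omega
          · exact ⟨fun _ => by simp, fun _ => by omega⟩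
        · rw [if_neg hm] at *
          refine ⟨?_, ?_, ?_, hM0, hMle⟩
          · constructor
            · intro h3
              have : pvM t = 3 := by omega
              exact List.mem_cons.2 (Or.inr (ih3.1 this))
            · intro hmem
              rcases List.mem_cons.1 hmem with h | h
              · exact absurd h.symm hh
              · have := ih3.2 h; omega
          · constructor
            · intro h2
              have : 2 ≤ pvM t := by omega
              rcases ih2.1 this with h | h
              · exact Or.inl (List.mem_cons.2 (Or.inr h))
              · exact Or.inr (List.mem_cons.2 (Or.inr h))
            · intro hmem
              rcases hmem with h | h
              · rcases List.mem_cons.1 h with h' | h'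
                · exact absurd h'.symm hh
                · have := ih2.2 (Or.inl h'); omega
              · rcases List.mem_cons.1 h with h' | h'
                · exact absurd h'.symm hm
                · have := ih2.2 (Or.inr h'); omega
          · exact ⟨fun _ => by simp, fun _ => by omega⟩

-- ===== VERDICT (by name: the statement is the Claim_ definition above) =====
theorem aggregate_risk_py_spec : Claim_equal_aggregate_risk_py := by
  intro flags _
  unfold Spec_aggregate_risk_py aggregate_risk_py aggregate_risk_py_alt
  rw [maxD_eq_pvM]
  obtain ⟨h3, h2, h1, h0, hle⟩ := pvM_char flags
  show (if pvN flags = [] then "" else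
        if pvN flags |>.contains "HIGH" then "HIGH" else
        if pvN flags |>.contains "MODERATE" then "MODERATE" else "LOW") = _
  by_cases hH : "HIGH" ∈ pvN flags
  · have hM : pvM flags = 3 := h3.2 hH
    have hne : pvN flags ≠ [] := by intro h; rw [h] at hH; simp at hH
    rw [if_neg hne, if_pos (by simpa using hH), hM]
    decide
  · by_cases hMo : "MODERATE" ∈ pvN flags
    · have hM : pvM flags = 2 := by
        have := h2.2 (Or.inr hMo)
        have h3' : pvM flags ≠ 3 := fun h => hH (h3.1 h)
        omega
      have hne : pvN flags ≠ [] := by intro h; rw [h] at hMo; simp at hMo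
      rw [if_neg hne, if_neg (by simpa using hH), if_pos (by simpa using hMo), hM]
      decide
    · by_cases hne : pvN flags = []
      · have hM : pvM flags = 0 := by
          have : ¬ 1 ≤ pvM flags := fun h => (h1.1 h) hne
          omega
        rw [if_pos hne, hM]
        decide
      · have hM : pvM flags = 1 := by
          have := h1.2 hne
          have h2' : ¬ 2 ≤ pvM flags := fun h => by
            rcases h2.1 h with h' | h' <;> [exact hH h'; exact hMo h']
          omega
        rw [if_neg hne, if_neg (by simpa using hH), if_neg (by simpa using hMo), hM]
        decide
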